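-- pv_equiv track=rewrite | github.com/Darhal/SARS-CoV2-Analysis | src/utility.py | nombre_element_echantillon
-- ===== SOURCE A (Python) =====
-- def nombre_elements(sequence, sampler):
--     '''Retourne un dictionnaire indiquant le nombre de chaque element de la sequence
--
--     Args:
--         sequence: the RNA/DNA/amino-acid sequence
--
--     Returns:
--         Dictionary that contains the number of elements as value and the element as key
--     '''
--     d = {s: 0 for s in sampler}
--
--     for i in sequence:
--         if i in sampler:
--             d[i] += 1
--
--     return d
--
-- def nombre_element_echantillon(tab, sampler):
--     '''Retourne un dictionnaire indiquant le nombre de chaque element dans l'echantillon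
--
--        Args:
--            sequence: the RNA/DNA/amino-acid sequence
--
--        Returns:
--            Dictionary that contains the number of elements (a list) as value and the element as key
--     '''
--     d = {}
--
--     for seq in tab:
--         nbr = nombre_elements(seq, sampler)
--         l = list(nbr.keys())
--
--         for element in l:
--             if element not in d:
--                 d[element] = [nbr[element]]
--             else:
--                 d[element].append(nbr[element])
--
--     return d
-- ===== SOURCE B (Python) =====
-- def nombre_element_echantillon(tab, sampler):
--     if not tab:
--         return {}
--     return {s: [sum(ch == s for ch in seq) for seq in tab]
--             for s in dict.fromkeys(sampler)}
-- ===== Notes on version B (the rewrite author's own statement) =====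
-- stated objective: simpler
-- what changed: B drops A's counter dicts entirely: it loops over the deduplicated sampler on the outside and for each sampler element directly counts equal characters of each sequence with a generator sum, instead of A's building a sampler-keyed count dict per sequence and merging it key by key into an accumulator dict.
import Mathlib
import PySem

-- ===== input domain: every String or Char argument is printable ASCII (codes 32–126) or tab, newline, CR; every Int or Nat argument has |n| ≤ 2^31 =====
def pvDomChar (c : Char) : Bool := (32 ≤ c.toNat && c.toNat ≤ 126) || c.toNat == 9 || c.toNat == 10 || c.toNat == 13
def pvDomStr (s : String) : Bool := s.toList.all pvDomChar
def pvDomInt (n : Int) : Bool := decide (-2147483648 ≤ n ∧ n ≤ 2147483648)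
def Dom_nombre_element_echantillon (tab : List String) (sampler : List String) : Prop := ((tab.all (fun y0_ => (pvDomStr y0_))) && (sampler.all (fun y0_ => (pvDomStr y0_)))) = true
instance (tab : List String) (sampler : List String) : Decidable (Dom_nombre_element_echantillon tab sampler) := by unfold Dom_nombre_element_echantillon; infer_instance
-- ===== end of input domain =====

-- B is dict-free: it loops over the deduplicated sampler on the outside and, per sampler
-- element, counts matching characters of each sequence directly — no counter dicts, no merging.


-- ===== PORT A =====
-- helper: Python iterates over a string's characters as length-1 strings
def pvChars (seq : String) : List String := seq.toList.map (fun c => String.ofList [c])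

def nombre_elements (sequence : String) (sampler : List String) : PySem.Dict String Int :=
  let d := sampler.foldl (fun d s => d.insert s 0) PySem.Dict.empty
  (pvChars sequence).foldl
    (fun d i => if sampler.contains i then d.modify i 0 (· + 1) else d) d

def nombre_element_echantillon (tab : List String) (sampler : List String) : List (String × List Int) :=
  (tab.foldl
    (fun d seq =>
      let nbr := nombre_elements seq sampler
      let l := nbr.keys
      l.foldl
        (fun d element =>
          if d.contains element = false then d.insert element [nbr.getD element 0]
          else d.modify element [] (fun xs => xs ++ [nbr.getD element 0]))
        d)
    PySem.Dict.empty).items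

-- ===== PORT B =====
-- {s: [sum(ch == s for ch in seq) for seq in tab] for s in dict.fromkeys(sampler)}
def nombre_element_echantillon_alt (tab : List String) (sampler : List String) : List (String × List Int) :=
  if tab = [] then []
  else
    (PySem.List.dedup sampler).map (fun s =>
      (s, tab.map (fun seq =>
        (pvChars seq).foldl (fun acc ch => acc + (if ch == s then 1 else 0)) (0 : Int))))

-- ===== PRECONDITION & SPEC =====
def Spec_nombre_element_echantillon (tab : List String) (sampler : List String) (out : List (String × List Int)) : Prop := out = nombre_element_echantillon_alt tab sampler
instance (tab : List String) (sampler : List String) (out : List (String × List Int)) : Decidable (Spec_nombre_element_echantillon tab sampler out) := by unfold Spec_nombre_element_echantillon; infer_instance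

-- ===== CLAIM (what is proved, stated in full; the proofs are below) =====
def Claim_equal_nombre_element_echantillon : Prop := ∀ (tab : List String) (sampler : List String), Dom_nombre_element_echantillon tab sampler → Spec_nombre_element_echantillon tab sampler (nombre_element_echantillon tab sampler)

-- ===== LEMMAS AND PROOFS =====

-- Set.update by elements already present is the identity
theorem pv_update_of_subset {s : List String} {xs : List String}
    (h : ∀ e ∈ xs, e ∈ s) : PySem.Set.update s xs = s := by
  induction xs generalizing s with
  | nil => rfl
  | cons x xs ih =>
    simp only [PySem.Set.update, List.foldl_cons]
    rw [PySem.Set.add_of_mem (h x (by simp))]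
    exact ih (fun e he => h e (by simp [he]))

-- the initial dict {s: 0 for s in sampler}
theorem pv_getD_init (l : List String) (d : PySem.Dict String Int) (s : String)
    (h : d.getD s 0 = 0) : (l.foldl (fun d s => d.insert s 0) d).getD s 0 = 0 := by
  induction l generalizing d with
  | nil => exact h
  | cons x l ih =>
    simp only [List.foldl_cons]
    exact ih _ (by rw [PySem.Dict.getD_insert]; split <;> simp [h])

theorem pv_keys_init (sampler : List String) :
    (sampler.foldl (fun d s => d.insert s 0) (PySem.Dict.empty : PySem.Dict String Int)).keys
      = PySem.Set.ofList sampler := by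
  have h := PySem.Dict.keys_foldl_insert (ν := Int) sampler (fun _ _ => 0) PySem.Dict.empty
  simpa [PySem.Set.update, PySem.Set.ofList_eq_foldl] using h

-- characterisation of A's per-sequence counter
theorem pv_nbr_keys (seq : String) (sampler : List String) :
    (nombre_elements seq sampler).keys = PySem.Set.ofList sampler := by
  unfold nombre_elements
  rw [← List.foldl_filter]
  have h := PySem.Dict.keys_foldl_modify (ν := Int)
    ((pvChars seq).filter sampler.contains) 0 (fun _ _ v => v + 1)
    (sampler.foldl (fun d s => d.insert s 0) PySem.Dict.empty)
  simp only [] at h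
  rw [h, pv_keys_init]
  exact pv_update_of_subset (by
    intro e he
    have := List.of_mem_filter he
    exact (PySem.Set.mem_ofList _ _).mpr (by simpa using this))

theorem pv_nbr_getD (seq : String) (sampler : List String) (s : String)
    (hs : s ∈ sampler) :
    (nombre_elements seq sampler).getD s 0 = ((pvChars seq).count s : Int) := by
  unfold nombre_elements
  rw [← List.foldl_filter]
  have h := PySem.Dict.getD_foldl_modify_add_one
    ((pvChars seq).filter sampler.contains)
    (sampler.foldl (fun d s => d.insert s 0) PySem.Dict.empty) s
  simp only [] at h
  rw [h, pv_getD_init _ _ _ (by simp [PySem.Dict.getD_empty])]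
  rw [List.count_filter (by simpa using hs)]
  simp

-- B's inner sum is a count
theorem pv_sum_count (l : List String) (s : String) (acc : Int) :
    l.foldl (fun acc ch => acc + (if ch == s then 1 else 0)) acc
      = acc + (l.count s : Int) := by
  induction l generalizing acc with
  | nil => simp
  | cons x l ih =>
    simp only [List.foldl_cons, ih, List.count_cons]
    by_cases h : x = s
    · simp [h]; ring
    · simp [h]

-- the inner merge loop of A, pointwise
def pvStep (v : String → Int) (d : PySem.Dict String (List Int)) (e : String) :
    PySem.Dict String (List Int) :=
  if d.contains e = false then d.insert e [v e]
  else d.modify e [] (fun xs => xs ++ [v e])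

theorem pv_inner_keys (v : String → Int) (ks : List String)
    (d : PySem.Dict String (List Int)) :
    (ks.foldl (pvStep v) d).keys = PySem.Set.update d.keys ks := by
  induction ks generalizing d with
  | nil => rfl
  | cons e ks ih =>
    simp only [List.foldl_cons, PySem.Set.update, List.foldl_cons] at *
    rw [ih]
    congr 1
    unfold pvStep
    by_cases hc : d.contains e = false
    · rw [if_pos hc, PySem.Dict.keys_insert_of_not_contains _ _ hc,
        PySem.Set.add_of_not_mem (by
          intro hm
          exact absurd ((PySem.Dict.contains_iff_mem_keys _ _).mpr hm) (by simp [hc]))]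
    · rw [if_neg hc]
      have hct : d.contains e = true := by
        cases h : d.contains e with
        | false => exact absurd h hc
        | true => rfl
      rw [PySem.Dict.keys_modify,
        PySem.Dict.keys_insert_of_contains _ _ hct,
        PySem.Set.add_of_mem ((PySem.Dict.contains_iff_mem_keys _ _).mp hct)]

theorem pv_inner_getD (v : String → Int) (ks : List String)
    (d : PySem.Dict String (List Int)) (s : String) (hnd : ks.Nodup) :
    (ks.foldl (pvStep v) d).getD s []
      = if s ∈ ks then d.getD s [] ++ [v s] else d.getD s [] := by
  induction ks generalizing d with
  | nil => simp
  | cons e ks ih =>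
    simp only [List.foldl_cons]
    rw [ih _ (List.Nodup.of_cons hnd)]
    by_cases hse : s = e
    · subst hse
      have hns : s ∉ ks := (List.nodup_cons.mp hnd).1
      rw [if_neg hns, if_pos (by simp)]
      unfold pvStep
      by_cases hc : d.contains s = false
      · rw [if_pos hc, PySem.Dict.getD_insert_self,
          PySem.Dict.getD_of_not_contains _ _ hc]
        simp
      · rw [if_neg hc, PySem.Dict.getD_modify_self]
    · have hmem : (s ∈ e :: ks) ↔ (s ∈ ks) := by simp [hse]
      have hstep : (pvStep v d e).getD s [] = d.getD s [] := by
        unfold pvStep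
        by_cases hc : d.contains e = false
        · rw [if_pos hc, PySem.Dict.getD_insert_of_ne _ _ _ hse]
        · rw [if_neg hc, PySem.Dict.getD_modify_of_ne _ _ _ hse]
      by_cases hm : s ∈ ks
      · rw [if_pos hm, if_pos (hmem.mpr hm), hstep]
      · rw [if_neg hm, if_neg (fun h => hm (hmem.mp h)), hstep]

-- the outer loop over tab, from a dict whose keys are already Set.ofList sampler
theorem pv_outer (sampler : List String) (ts : List String)
    (d : PySem.Dict String (List Int)) (hk : d.keys = PySem.Set.ofList sampler) :
    (ts.foldl
        (fun d seq =>
          let nbr := nombre_elements seq sampler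
          nbr.keys.foldl (pvStep (fun e => nbr.getD e 0)) d) d).keys
        = PySem.Set.ofList sampler
    ∧ ∀ s ∈ sampler,
      (ts.foldl
        (fun d seq =>
          let nbr := nombre_elements seq sampler
          nbr.keys.foldl (pvStep (fun e => nbr.getD e 0)) d) d).getD s []
        = d.getD s [] ++ ts.map (fun seq => ((pvChars seq).count s : Int)) := by
  induction ts generalizing d with
  | nil => exact ⟨hk, by simp⟩
  | cons t ts ih =>
    simp only [List.foldl_cons]
    set nbr := nombre_elements t sampler with hnbr
    have hkeys : nbr.keys = PySem.Set.ofList sampler := pv_nbr_keys t sampler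
    set d1 := nbr.keys.foldl (pvStep (fun e => nbr.getD e 0)) d with hd1
    have hk1 : d1.keys = PySem.Set.ofList sampler := by
      rw [hd1, pv_inner_keys, hk, hkeys]
      exact pv_update_of_subset (fun e he => he)
    obtain ⟨hK, hG⟩ := ih d1 hk1
    refine ⟨hK, ?_⟩
    intro s hs
    rw [hG s hs, hd1, pv_inner_getD _ _ _ _ (by rw [hkeys]; exact PySem.Set.nodup_ofList sampler)]
    rw [hkeys, if_pos ((PySem.Set.mem_ofList _ _).mpr hs)]
    rw [hnbr, pv_nbr_getD t sampler s hs]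
    simp

-- ===== VERDICT (by name: the statement is the Claim_ definition above) =====
theorem nombre_element_echantillon_spec : Claim_equal_nombre_element_echantillon := by
  intro tab sampler _
  unfold Spec_nombre_element_echantillon nombre_element_echantillon nombre_element_echantillon_alt
  cases tab with
  | nil => rfl
  | cons t ts =>
    rw [if_neg (by simp)]
    set nbr := nombre_elements t sampler with hnbr
    have hkeys : nbr.keys = PySem.Set.ofList sampler := pv_nbr_keys t sampler
    have hnodK : (PySem.Set.ofList sampler).Nodup := PySem.Set.nodup_ofList sampler
    set d1 := nbr.keys.foldl (pvStep (fun e => nbr.getD e 0)) PySem.Dict.empty with hd1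
    have hk1 : d1.keys = PySem.Set.ofList sampler := by
      rw [hd1, pv_inner_keys, hkeys, PySem.Dict.keys_empty]
      show PySem.Set.update [] (PySem.Set.ofList sampler) = PySem.Set.ofList sampler
      rw [PySem.Set.update_nil_left, PySem.Set.ofList_ofList]
    have hg1 : ∀ s ∈ sampler, d1.getD s [] = [((pvChars t).count s : Int)] := by
      intro s hs
      rw [hd1, pv_inner_getD _ _ _ _ (by rw [hkeys]; exact hnodK)]
      rw [hkeys, if_pos ((PySem.Set.mem_ofList _ _).mpr hs)]
      rw [hnbr, pv_nbr_getD t sampler s hs]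
      simp [PySem.Dict.getD_empty]
    obtain ⟨hK, hG⟩ := pv_outer sampler ts d1 hk1
    have hfold :
        ((t :: ts).foldl
          (fun d seq =>
            let nbr := nombre_elements seq sampler
            let l := nbr.keys
            l.foldl
              (fun d element =>
                if d.contains element = false then d.insert element [nbr.getD element 0]
                else d.modify element [] (fun xs => xs ++ [nbr.getD element 0])) d)
          PySem.Dict.empty)
        = (ts.foldl
            (fun d seq =>
              let nbr := nombre_elements seq sampler
              nbr.keys.foldl (pvStep (fun e => nbr.getD e 0)) d) d1) := by
      simp only [List.foldl_cons]
      rfl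
    rw [hfold]
    set D := ts.foldl
        (fun d seq =>
          let nbr := nombre_elements seq sampler
          nbr.keys.foldl (pvStep (fun e => nbr.getD e 0)) d) d1 with hD
    have hnodD : D.keys.Nodup := by rw [hK]; exact hnodK
    rw [PySem.Dict.items_eq_map_keys D hnodD []]
    rw [hK]
    rw [PySem.List.dedup_eq_ofList]
    apply List.map_congr_left
    intro s hsK
    have hs : s ∈ sampler := (PySem.Set.mem_ofList _ _).mp hsK
    rw [hG s hs, hg1 s hs]
    have hmap : List.map (fun seq =>
          (pvChars seq).foldl (fun acc ch => acc + (if ch == s then 1 else 0)) (0 : Int)) (t :: ts)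
        = List.map (fun seq => ((pvChars seq).count s : Int)) (t :: ts) := by
      apply List.map_congr_left
      intro a _
      exact (pv_sum_count (pvChars a) s 0).trans (by simp)
    rw [hmap]
    simp
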